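-- pv_equiv track=rewrite | github.com/dlocke/nirvana-takehome | my_api/data_collector.py | _coalesce_by_maximum
-- ===== SOURCE A (Python) =====
-- def _coalesce_by_maximum(data):
--     result = {}
--     for category in data[0]:
--         values = []
--         for row in data:
--             values.append(row[category])
--
--         result[category] = max(values)
--
--     return result
-- ===== SOURCE B (Python) =====
-- def _coalesce_by_maximum(data):
--     result = dict(data[0])
--     for row in data[1:]:
--         for category in result:
--             v = row[category]
--             if v > result[category]:
--                 result[category] = v
--     return result
-- ===== Notes on version B (the rewrite author's own statement) =====
-- stated objective: alternative
-- what changed: A builds, per category of the first row, a column list of that category's value in every row and takes max of it; B seeds result with a copy of the first row and does one row-major streaming pass over the remaining rows, updating each category's running maximum in place with a strict comparison.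
import Mathlib
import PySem

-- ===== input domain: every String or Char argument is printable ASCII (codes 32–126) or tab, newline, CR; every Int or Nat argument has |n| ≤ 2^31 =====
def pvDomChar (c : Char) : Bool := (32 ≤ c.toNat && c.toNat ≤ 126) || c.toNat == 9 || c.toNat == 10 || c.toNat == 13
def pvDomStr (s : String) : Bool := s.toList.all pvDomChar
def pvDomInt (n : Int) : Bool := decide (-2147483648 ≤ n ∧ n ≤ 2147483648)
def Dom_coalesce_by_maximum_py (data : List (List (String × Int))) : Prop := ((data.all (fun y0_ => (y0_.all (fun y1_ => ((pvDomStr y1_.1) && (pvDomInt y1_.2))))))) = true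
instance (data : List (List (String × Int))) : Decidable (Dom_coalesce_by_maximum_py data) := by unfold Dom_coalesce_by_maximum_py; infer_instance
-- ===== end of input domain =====

-- B replaces A's column-major build-a-list-then-max per category by one row-major streaming
-- fold maintaining running maxima (objective: alternative decomposition, same asymptotic cost).

-- ===== PORT A =====
-- row[category] (Python dict lookup); Pre_ guarantees the key is present, so getD 0 is never the raise case
def coalesce_by_maximum_py (data : List (List (String × Int))) : List (String × Int) :=
  let first := data.headD []          -- data[0]; Pre_ excludes data = [] (IndexError)
  ((PySem.Dict.mk first).keys.foldl (fun (result : PySem.Dict String Int) category =>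
      let values := data.foldl (fun (vs : List Int) row =>
        vs ++ [((PySem.Dict.mk row).get? category).getD 0]) []
      result.insert category ((PySem.List.max? values (fun v => v)).getD 0))
    PySem.Dict.empty).items

-- ===== PORT B =====
def coalesce_by_maximum_py_alt (data : List (List (String × Int))) : List (String × Int) :=
  let result0 : PySem.Dict String Int := PySem.Dict.mk (data.headD [])   -- dict(data[0])
  ((data.drop 1).foldl (fun (result : PySem.Dict String Int) row =>
      result.keys.foldl (fun (res : PySem.Dict String Int) category =>
        let v := ((PySem.Dict.mk row).get? category).getD 0
        if v > res.getD category 0 then res.insert category v else res) result)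
    result0).items

-- ===== PRECONDITION & SPEC =====
-- Pre_ excludes exactly where Python A raises: empty data (IndexError on the first row) and rows
-- missing a key of data[0] (KeyError); rows with duplicate keys cannot arise from Python dicts.
def Pre_coalesce_by_maximum_py (data : List (List (String × Int))) : Prop :=
  data ≠ [] ∧ (∀ row ∈ data, (row.map Prod.fst).Nodup) ∧
  ∀ k ∈ (data.headD []).map Prod.fst, ∀ row ∈ data, k ∈ row.map Prod.fst
instance (data : List (List (String × Int))) : Decidable (Pre_coalesce_by_maximum_py data) := by
  unfold Pre_coalesce_by_maximum_py; infer_instance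

def pvWitness_coalesce_by_maximum_py : (List (List (String × Int))) :=
  [[("a", 1), ("b", 2)], [("a", 3), ("b", 0)]]

def Spec_coalesce_by_maximum_py (data : List (List (String × Int))) (out : List (String × Int)) : Prop := out = coalesce_by_maximum_py_alt data
instance (data : List (List (String × Int))) (out : List (String × Int)) : Decidable (Spec_coalesce_by_maximum_py data out) := by unfold Spec_coalesce_by_maximum_py; infer_instance

-- ===== CLAIM (what is proved, stated in full; the proofs are below) =====
def Claim_equal_coalesce_by_maximum_py : Prop := ∀ (data : List (List (String × Int))), Dom_coalesce_by_maximum_py data → Pre_coalesce_by_maximum_py data → Spec_coalesce_by_maximum_py data (coalesce_by_maximum_py data)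

-- ===== LEMMAS AND PROOFS =====

def pvVal (row : List (String × Int)) (k : String) : Int := ((PySem.Dict.mk row).get? k).getD 0

def pvStep (row : List (String × Int)) (res : PySem.Dict String Int) (c : String) : PySem.Dict String Int :=
  if pvVal row c > res.getD c 0 then res.insert c (pvVal row c) else res

lemma pvStep_keys (row : List (String × Int)) (res : PySem.Dict String Int) (c : String)
    (h : res.contains c = true) : (pvStep row res c).keys = res.keys := by
  unfold pvStep; split_ifs with hv
  · exact PySem.Dict.keys_insert_of_contains _ _ h
  · rfl

lemma pvStep_contains (row : List (String × Int)) (res : PySem.Dict String Int) (c c' : String)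
    (h : res.contains c' = true) : (pvStep row res c).contains c' = true := by
  unfold pvStep; split_ifs with hv
  · simp [PySem.Dict.contains_insert, h]
  · exact h

lemma inner_keys (row : List (String × Int)) (cats : List String) :
    ∀ (res : PySem.Dict String Int), (∀ c ∈ cats, res.contains c = true) →
      (cats.foldl (pvStep row) res).keys = res.keys := by
  induction cats with
  | nil => intro res _; rfl
  | cons c cs ih =>
    intro res h
    have hc := h c (by simp)
    have := ih (pvStep row res c) (fun c' hc' => pvStep_contains _ _ _ _ (h c' (by simp [hc'])))
    simp [List.foldl_cons, this, pvStep_keys _ _ _ hc]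

lemma pvStep_get?_self (row : List (String × Int)) (res : PySem.Dict String Int) (c : String)
    (h : res.contains c = true) :
    (pvStep row res c).get? c = some (max (res.getD c 0) (pvVal row c)) := by
  obtain ⟨x, hx⟩ : ∃ x, res.get? c = some x := by
    cases hg : res.get? c with
    | none => rw [PySem.Dict.contains_eq_isSome_get?, hg] at h; simp at h
    | some x => exact ⟨x, rfl⟩
  have hd : res.getD c 0 = x := by simp [PySem.Dict.getD_eq_get?_getD, hx]
  unfold pvStep
  split_ifs with hv
  · rw [PySem.Dict.get?_insert_self, hd]
    congr 1; omega
  · rw [hx, hd]; congr 1; omega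

lemma pvStep_get?_ne (row : List (String × Int)) (res : PySem.Dict String Int) (c k : String)
    (h : k ≠ c) : (pvStep row res c).get? k = res.get? k := by
  unfold pvStep; split_ifs with hv
  · exact PySem.Dict.get?_insert_of_ne _ _ h
  · rfl

lemma inner_get? (row : List (String × Int)) (cats : List String) (k : String) :
    ∀ (res : PySem.Dict String Int), cats.Nodup → (∀ c ∈ cats, res.contains c = true) →
      (cats.foldl (pvStep row) res).get? k =
        if k ∈ cats then some (max (res.getD k 0) (pvVal row k)) else res.get? k := by
  induction cats with
  | nil => intro res _ _; simp
  | cons c cs ih =>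
    intro res hnd h
    have hc := h c (by simp)
    have hnd' : cs.Nodup := hnd.of_cons
    have hcncs : c ∉ cs := by simp [List.nodup_cons] at hnd; exact hnd.1
    have hcont' : ∀ c' ∈ cs, (pvStep row res c).contains c' = true :=
      fun c' hc' => pvStep_contains _ _ _ _ (h c' (by simp [hc']))
    rw [List.foldl_cons, ih _ hnd' hcont']
    by_cases hkcs : k ∈ cs
    · have hkc : k ≠ c := fun e => hcncs (e ▸ hkcs)
      have : (pvStep row res c).getD k 0 = res.getD k 0 := by
        simp [PySem.Dict.getD_eq_get?_getD, pvStep_get?_ne _ _ _ _ hkc]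
      simp [hkcs, this]
    · by_cases hkc : k = c
      · subst hkc
        simp [hkcs, pvStep_get?_self _ _ _ hc]
      · simp [hkcs, hkc, pvStep_get?_ne _ _ _ _ hkc]

lemma outer_fold (rows : List (List (String × Int))) (ks : List String) (hnd : ks.Nodup) :
    ∀ (d : PySem.Dict String Int) (g : String → Int), d.keys = ks →
      (∀ k, d.get? k = if k ∈ ks then some (g k) else none) →
      (rows.foldl (fun result row => result.keys.foldl (pvStep row) result) d).keys = ks ∧
      ∀ k, (rows.foldl (fun result row => result.keys.foldl (pvStep row) result) d).get? k =
        if k ∈ ks then some (rows.foldl (fun m row => max m (pvVal row k)) (g k)) else none := by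
  induction rows with
  | nil => intro d g hk hg; exact ⟨hk, by simp [hg]⟩
  | cons row rows ih =>
    intro d g hk hg
    have hcont : ∀ c ∈ ks, d.contains c = true := by
      intro c hc
      rw [PySem.Dict.contains_eq_isSome_get?, hg c]
      simp [hc]
    have hcont' : ∀ c ∈ d.keys, d.contains c = true := by rw [hk]; exact hcont
    have hk1 : (d.keys.foldl (pvStep row) d).keys = ks := by
      rw [inner_keys row d.keys d hcont', hk]
    have hg1 : ∀ k, (d.keys.foldl (pvStep row) d).get? k =
        if k ∈ ks then some (max (g k) (pvVal row k)) else none := by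
      intro k
      rw [inner_get? row d.keys k d (hk ▸ hnd) hcont', hk]
      by_cases hkm : k ∈ ks
      · have : d.getD k 0 = g k := by simp [PySem.Dict.getD_eq_get?_getD, hg k, hkm]
        simp [hkm, this]
      · simp [hkm, hg k]
    simpa using ih _ _ hk1 hg1

lemma items_of_map_form (d : PySem.Dict String Int) (ks : List String) (f : String → Int)
    (hk : d.keys = ks) (hnd : ks.Nodup) (hg : ∀ k ∈ ks, d.get? k = some (f k)) :
    d.items = ks.map (fun k => (k, f k)) := by
  have hkeys : d.items.map Prod.fst = ks := by
    rw [← hk]; simp [PySem.Dict.keys]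
  have hlen : d.items.length = ks.length := by
    rw [← hkeys]; simp
  apply List.ext_getElem (by simpa using hlen)
  intro i h1 h2
  have hi1 : d.items[i].1 = ks[i] := by
    have := congrArg (fun l => l[i]?) hkeys
    simp only [List.getElem?_map] at this
    have h' := this
    rw [List.getElem?_eq_getElem h1, List.getElem?_eq_getElem (by omega)] at h'
    simpa using h'
  have hmem : d.items[i] ∈ d.items := List.getElem_mem _
  have hnd' : d.keys.Nodup := hk ▸ hnd
  have := PySem.Dict.get?_of_mem_items (d := d) (k := d.items[i].1) (v := d.items[i].2)
    (by simp) hnd'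
  rw [hi1] at this
  rw [hg ks[i] (List.getElem_mem _)] at this
  have hi2 : d.items[i].2 = f ks[i] := by injection this.symm
  simp only [List.getElem_map]
  exact Prod.ext hi1 hi2

def pvAval (data : List (List (String × Int))) (c : String) : Int :=
  (PySem.List.max? (data.foldl (fun (vs : List Int) row => vs ++ [((PySem.Dict.mk row).get? c).getD 0]) []) (fun v => v)).getD 0

lemma pvAval_eq (r0 : List (String × Int)) (rest : List (List (String × Int))) (c : String) :
    pvAval (r0 :: rest) c = rest.foldl (fun m row => max m (pvVal row c)) (pvVal r0 c) := by
  unfold pvAval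
  rw [PySem.List.foldl_append_singleton_eq_map (fun row => ((PySem.Dict.mk row).get? c).getD 0)]
  rw [List.nil_append, List.map_cons, PySem.List.max?_id_cons, Option.getD_some, List.foldl_map]
  rfl

lemma agree_of_pre : ∀ (data : List (List (String × Int))),
    data ≠ [] → (∀ row ∈ data, (row.map Prod.fst).Nodup) →
    coalesce_by_maximum_py data = coalesce_by_maximum_py_alt data := by
  intro data hne hnodup
  obtain ⟨r0, rest, rfl⟩ : ∃ r0 rest, data = r0 :: rest := by
    cases data with
    | nil => exact absurd rfl hne
    | cons a b => exact ⟨a, b, rfl⟩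
  have hnd : (r0.map Prod.fst).Nodup := hnodup r0 (by simp)
  have hkeys : (PySem.Dict.mk r0).keys = r0.map Prod.fst := PySem.Dict.keys_mk r0
  -- A side
  have hA : coalesce_by_maximum_py (r0 :: rest) =
      ((PySem.Dict.mk r0).keys.foldl
        (fun result c => result.insert c (pvAval (r0 :: rest) c)) PySem.Dict.empty).items := rfl
  have hAitems : coalesce_by_maximum_py (r0 :: rest) =
      (r0.map Prod.fst).map (fun c => (c, pvAval (r0 :: rest) c)) := by
    rw [hA, hkeys]
    rw [PySem.Dict.items_foldl_insert_fresh (r0.map Prod.fst) (fun a => a)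
      (fun c => pvAval (r0 :: rest) c) PySem.Dict.empty
      (fun a _ => PySem.Dict.contains_empty a) (by simpa using hnd)]
    simp [PySem.Dict.empty]
  -- B side
  have hbase : ∀ k, (PySem.Dict.mk r0).get? k =
      if k ∈ r0.map Prod.fst then some (pvVal r0 k) else none := by
    intro k
    by_cases hk : k ∈ r0.map Prod.fst
    · cases hx : (PySem.Dict.mk r0).get? k with
      | none =>
        exfalso
        have := (PySem.Dict.get?_eq_none_iff_not_mem_keys _ _).mp hx
        rw [hkeys] at this; exact this hk
      | some x => simp [hk, pvVal, hx]
    · rw [if_neg hk]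
      apply (PySem.Dict.get?_eq_none_iff_not_mem_keys _ _).mpr
      rw [hkeys]; exact hk
  obtain ⟨hkB, hgB⟩ := outer_fold rest (r0.map Prod.fst) hnd (PySem.Dict.mk r0)
    (fun k => pvVal r0 k) hkeys hbase
  have hB : coalesce_by_maximum_py_alt (r0 :: rest) =
      (rest.foldl (fun result row => result.keys.foldl (pvStep row) result)
        (PySem.Dict.mk r0)).items := rfl
  have hBitems : coalesce_by_maximum_py_alt (r0 :: rest) =
      (r0.map Prod.fst).map (fun k => (k, rest.foldl (fun m row => max m (pvVal row k)) (pvVal r0 k))) := by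
    rw [hB]
    exact items_of_map_form _ _ _ hkB hnd (fun k hk => by rw [hgB k, if_pos hk])
  rw [hAitems, hBitems]
  exact List.map_congr_left (fun k _ => by rw [pvAval_eq])

-- ===== VERDICT (by name: the statement is the Claim_ definition above) =====
theorem coalesce_by_maximum_py_spec : Claim_equal_coalesce_by_maximum_py := by
  intro data _ hpre
  show coalesce_by_maximum_py data = coalesce_by_maximum_py_alt data
  exact agree_of_pre data hpre.1 hpre.2.1
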